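-- pv_equiv track=rewrite | github.com/swyoo5/BaekJoon | 프로그래머스/1/135808. 과일 장수/과일 장수.py | solution
-- ===== SOURCE A (Python) =====
-- def solution(k, m, scores):
--     answer = 0
--     scores = sorted(scores, reverse = True)
--
--     for i in range(0, len(scores), m) :
--         box = scores[i : i + m]
--         if len(box) == m :
--             answer += min(box) * m
--
--     return answer
-- ===== SOURCE B (Python) =====
-- def solution(k, m, scores):
--     # No full box exists unless m is positive; sort ascending once and pick
--     # each box's minimum directly: after dropping the len(scores) % m leftover
--     # smallest fruits, every m-th element is the cheapest fruit of one box.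
--     if m <= 0:
--         return 0
--     s = sorted(scores)
--     return m * sum(s[len(s) % m :: m])
-- ===== Notes on version B (the rewrite author's own statement) =====
-- stated objective: simpler
-- what changed: B replaces the chunk-by-chunk loop (slice each box, call min, test its length) by a closed-form selection: sort ascending once, drop the len % m leftover smallest fruits, and sum every m-th element (each box's minimum) in one strided slice.
-- crash fix: When m == 0 A raises ValueError (range step zero); B returns 0 since no full box exists. — e.g. on solution(1, 0, [3, 1]): A raises ValueError, B returns 0
import Mathlib
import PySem

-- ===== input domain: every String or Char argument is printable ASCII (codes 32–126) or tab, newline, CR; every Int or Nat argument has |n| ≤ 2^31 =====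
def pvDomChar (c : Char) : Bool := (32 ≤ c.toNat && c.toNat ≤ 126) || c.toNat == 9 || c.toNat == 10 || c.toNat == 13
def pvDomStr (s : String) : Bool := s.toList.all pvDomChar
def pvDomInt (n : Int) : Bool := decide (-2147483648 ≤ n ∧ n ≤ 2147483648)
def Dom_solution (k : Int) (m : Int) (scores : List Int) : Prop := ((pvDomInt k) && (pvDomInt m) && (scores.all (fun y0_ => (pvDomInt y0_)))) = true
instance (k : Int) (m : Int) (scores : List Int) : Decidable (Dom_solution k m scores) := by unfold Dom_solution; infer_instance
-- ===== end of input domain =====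

-- B sorts ascending once and sums every m-th element after the len % m leftover,
-- instead of A's chunk loop (slice each box, min, length test); return values proved equal for m ≠ 0.

-- ===== PORT A =====
def solution (k : Int) (m : Int) (scores : List Int) : Int :=
  let s := PySem.List.sorted scores (fun x => x) true
  (PySem.List.pyRange 0 (s.length : Int) m).foldl (fun answer i =>
    let box := PySem.List.slice s (some i) (some (i + m))
    if (box.length : Int) = m then
      answer + ((PySem.List.min? box (fun x => x)).getD 0) * m
    else answer) 0

-- ===== PORT B =====
def solution_alt (k : Int) (m : Int) (scores : List Int) : Int :=
  if m ≤ 0 then 0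
  else
    let s := PySem.List.sorted scores (fun x => x) false
    m * (((PySem.List.slice? s (some (PySem.Int.mod (s.length : Int) m)) none m).getD []).sum)

-- ===== PRECONDITION & SPEC =====
-- Pre_ excludes only m = 0, where Python's range(0, len, 0) raises ValueError.
def Pre_solution (k : Int) (m : Int) (scores : List Int) : Prop := m ≠ 0
instance (k : Int) (m : Int) (scores : List Int) : Decidable (Pre_solution k m scores) := by unfold Pre_solution; infer_instance
def pvWitness_solution : Int × Int × List Int := (2, 2, [1, 2, 3, 1, 2])

-- When m == 0 A raises ValueError (range step zero); B returns 0 since no full box exists.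
def Raises_solution (k : Int) (m : Int) (scores : List Int) : Prop := m = 0
instance (k : Int) (m : Int) (scores : List Int) : Decidable (Raises_solution k m scores) := by unfold Raises_solution; infer_instance
def pvRaiseWitness_solution : Int × Int × List Int := (1, 0, [3, 1])
def pvRaiseWitnessOut_solution : Int := 0

def Spec_solution (k : Int) (m : Int) (scores : List Int) (out : Int) : Prop := out = solution_alt k m scores
instance (k : Int) (m : Int) (scores : List Int) (out : Int) : Decidable (Spec_solution k m scores out) := by unfold Spec_solution; infer_instance

-- ===== CLAIM (what is proved, stated in full; the proofs are below) =====
def Claim_equal_solution : Prop := ∀ (k : Int) (m : Int) (scores : List Int), Dom_solution k m scores → Pre_solution k m scores → Spec_solution k m scores (solution k m scores)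
def Claim_raises_solution : Prop := (∀ (k : Int) (m : Int) (scores : List Int), Dom_solution k m scores → Raises_solution k m scores → ¬ Pre_solution k m scores) ∧ (Dom_solution (pvRaiseWitness_solution.1) (pvRaiseWitness_solution.2.1) (pvRaiseWitness_solution.2.2) ∧ Raises_solution (pvRaiseWitness_solution.1) (pvRaiseWitness_solution.2.1) (pvRaiseWitness_solution.2.2) ∧ solution_alt (pvRaiseWitness_solution.1) (pvRaiseWitness_solution.2.1) (pvRaiseWitness_solution.2.2) = pvRaiseWitnessOut_solution)

-- ===== LEMMAS AND PROOFS =====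

theorem sorted_rev_eq_reverse (xs : List Int) :
    PySem.List.sorted xs (fun x => x) true = (PySem.List.sorted xs (fun x => x) false).reverse := by
  have h := PySem.List.eq_of_perm_of_pairwise_le_of_injective (l₁ := (PySem.List.sorted xs (fun x => x) true).reverse)
    (l₂ := PySem.List.sorted xs (fun x => x) false) (fun x => x) (fun a b h => h)
    (((PySem.List.sorted_perm xs (fun x => x) true).symm.trans (List.reverse_perm _).symm).symm.trans (PySem.List.sorted_perm xs (fun x => x) false).symm)
    (List.pairwise_reverse.mpr (PySem.List.sorted_pairwise_rev xs (fun x => x)))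
    (PySem.List.sorted_pairwise xs (fun x => x))
  calc PySem.List.sorted xs (fun x => x) true
      = (PySem.List.sorted xs (fun x => x) true).reverse.reverse := (List.reverse_reverse _).symm
    _ = _ := by rw [h]

theorem min_chunk_eq (a : List Int) (ha : a.Pairwise (· ≤ ·)) (mn kk : Nat) (hmn : 0 < mn)
    (h : mn * (kk + 1) ≤ a.length) :
    ((PySem.List.min? ((a.reverse.drop (mn * kk)).take mn) (fun x => x)).getD 0)
      = a.getD (a.length - mn * (kk + 1)) 0 := by
  have hmul : mn * (kk + 1) = mn * kk + mn := by ring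
  have hlc : ((a.reverse.drop (mn * kk)).take mn).length = mn := by
    rw [List.length_take, List.length_drop, List.length_reverse]; omega
  have hmono : ∀ i j : Nat, (hij : i ≤ j) → (hj : j < a.length) → a[i]'(by omega) ≤ a[j] := by
    intro i j hij hj
    rcases Nat.lt_or_eq_of_le hij with hlt | rfl
    · exact (List.pairwise_iff_getElem.mp ha) i j (by omega) hj hlt
    · exact le_refl _
  have hgetc : ∀ t : Nat, (ht : t < mn) → ((a.reverse.drop (mn * kk)).take mn)[t]'(by omega) = a[a.length - 1 - (mn * kk + t)]'(by omega) := by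
    intro t ht
    rw [List.getElem_take, List.getElem_drop, List.getElem_reverse]
  have hne : (a.reverse.drop (mn * kk)).take mn ≠ [] := by
    intro hc; rw [hc] at hlc; simp at hlc; omega
  obtain ⟨v, hv⟩ : ∃ v, PySem.List.min? ((a.reverse.drop (mn * kk)).take mn) (fun x => x) = some v := by
    cases hmin : PySem.List.min? ((a.reverse.drop (mn * kk)).take mn) (fun x => x) with
    | none => exact absurd ((PySem.List.min?_eq_none_iff _ _).mp hmin) hne
    | some v => exact ⟨v, rfl⟩
  have hlo : a.length - mn * (kk + 1) < a.length := by omega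
  have hlast : ((a.reverse.drop (mn * kk)).take mn)[mn - 1]'(by omega) = a[a.length - mn * (kk + 1)]'hlo := by
    rw [hgetc (mn - 1) (by omega)]
    congr 1; omega
  have hmem_lo : a[a.length - mn * (kk + 1)]'hlo ∈ (a.reverse.drop (mn * kk)).take mn := by
    rw [← hlast]; exact List.getElem_mem _
  have h1 : v ≤ a[a.length - mn * (kk + 1)]'hlo := PySem.List.min?_isMin hv _ hmem_lo
  have h2 : a[a.length - mn * (kk + 1)]'hlo ≤ v := by
    obtain ⟨t, ht, hteq⟩ := List.mem_iff_getElem.mp (PySem.List.min?_mem hv)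
    rw [hlc] at ht
    rw [hgetc t ht] at hteq
    rw [← hteq]
    exact hmono _ _ (by omega) (by omega)
  rw [hv, Option.getD_some, List.getD_eq_getElem a 0 hlo]
  exact le_antisymm h1 h2


theorem sum_map_range (f : Nat → Int) (n : Nat) : ((List.range n).map f).sum = ∑ i ∈ Finset.range n, f i := rfl

theorem solutionA_eq_sum (k m : Int) (scores : List Int) (hm : 0 < m) :
    solution k m scores =
      ∑ kk ∈ Finset.range (scores.length / m.toNat),
        (PySem.List.sorted scores (fun x => x) false).getD
          (scores.length - m.toNat * (kk + 1)) 0 * m := by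
  have hmcast : m = (m.toNat : Int) := (Int.toNat_of_nonneg hm.le).symm
  have hmn : 0 < m.toNat := by omega
  set a := PySem.List.sorted scores (fun x => x) false with ha
  set mn := m.toNat with hmn'
  set n := scores.length with hn
  have hlen : a.length = n := PySem.List.length_sorted scores (fun x => x) false
  have hpw : a.Pairwise (· ≤ ·) := PySem.List.sorted_pairwise scores (fun x => x)
  have hA : solution k m scores = (PySem.List.pyRange 0 ((a.reverse.length : Nat) : Int) m).foldl
      (fun answer i =>
        if ((PySem.List.slice a.reverse (some i) (some (i + m))).length : Int) = m then
          answer + ((PySem.List.min? (PySem.List.slice a.reverse (some i) (some (i + m))) (fun x => x)).getD 0) * m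
        else answer) 0 := by
    rw [solution, sorted_rev_eq_reverse]
  rw [hA]
  rw [List.length_reverse, hlen]
  -- body to additive form
  refine Eq.trans (PySem.List.foldl_congr_mem _ _
    (fun answer i => answer +
      (if ((PySem.List.slice a.reverse (some i) (some (i + m))).length : Int) = m then
        ((PySem.List.min? (PySem.List.slice a.reverse (some i) (some (i + m))) (fun x => x)).getD 0) * m
      else 0)) _
    (by intro acc x _; by_cases hc : ((PySem.List.slice a.reverse (some x) (some (x + m))).length : Int) = m <;> simp [hc])) ?_
  rw [PySem.List.foldl_add, zero_add]
  rw [PySem.List.pyRange_of_pos 0 (n : Int) hm, List.map_map, sum_map_range]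
  clear_value mn n
  set c := (if (0:Int) < (n : Int) then (((n : Int) - 0 + m - 1) / m).toNat else 0) with hc
  have hG : ∀ kk : Nat,
      (if ((PySem.List.slice a.reverse (some (0 + m * (kk : Int))) (some (0 + m * (kk : Int) + m))).length : Int) = m then
        ((PySem.List.min? (PySem.List.slice a.reverse (some (0 + m * (kk : Int))) (some (0 + m * (kk : Int) + m))) (fun x => x)).getD 0) * m
      else 0)
      = (if kk < n / mn then a.getD (n - mn * (kk + 1)) 0 * m else 0) := by
    intro kk
    have e1 : (0:Int) + m * (kk : Int) = ((mn * kk : Nat) : Int) := by rw [hmcast]; push_cast; ring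
    have e2 : (0:Int) + m * (kk : Int) + m = ((mn * kk : Nat) : Int) + ((mn : Nat) : Int) := by rw [hmcast]; push_cast; ring
    rw [e2, e1, PySem.List.slice_natCast_add]
    have hlc : ((a.reverse.drop (mn * kk)).take mn).length = min mn (n - mn * kk) := by
      rw [List.length_take, List.length_drop, List.length_reverse, hlen]
    have hr1 : mn * (kk + 1) = mn * kk + mn := by ring
    have hr2 : (kk + 1) * mn = mn * kk + mn := by ring
    by_cases hkq : kk < n / mn
    · have hfull : mn * (kk + 1) ≤ n := by
        have h' := (Nat.le_div_iff_mul_le hmn).mp (by omega : kk + 1 ≤ n / mn)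
        omega
      have hcond : ((((a.reverse.drop (mn * kk)).take mn).length : Nat) : Int) = m := by
        rw [hlc, hmcast]
        congr 1
        exact Nat.min_eq_left (by omega)
      rw [if_pos hcond, if_pos hkq, min_chunk_eq a hpw mn kk hmn (by rw [hlen]; exact hfull), hlen]
    · have hnotfull : n < mn * (kk + 1) := by
        have := (Nat.div_lt_iff_lt_mul hmn).mp (by omega : n / mn < kk + 1)
        omega
      have hcond : ¬ ((((a.reverse.drop (mn * kk)).take mn).length : Nat) : Int) = m := by
        rw [hlc, hmcast]
        intro hcc
        have hcc' := Int.natCast_inj.mp hcc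
        have hle := Nat.min_le_right mn (n - mn * kk)
        rw [hcc'] at hle
        omega
      rw [if_neg hcond, if_neg hkq]
  refine Eq.trans (Finset.sum_congr rfl (fun kk _ => hG kk)) ?_
  have hqc : n / mn ≤ c := by
    rw [hc]
    by_cases hn0 : 0 < n
    · rw [if_pos (by exact_mod_cast hn0)]
      have e3 : (n : Int) - 0 + m - 1 = ((n + mn - 1 : Nat) : Int) := by rw [hmcast]; push_cast; omega
      rw [e3, hmcast, ← Int.natCast_div, Int.toNat_natCast]
      exact Nat.div_le_div_right (by omega)
    · have : n = 0 := by omega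
      simp [this]
  rw [← Finset.sum_subset (s₁ := Finset.range (n / mn)) (s₂ := Finset.range c)
    (by intro x hx; simp only [Finset.mem_range] at *; omega)
    (fun x _ hx => if_neg (by simp only [Finset.mem_range] at hx; omega))]
  exact Finset.sum_congr rfl (fun kk hk => if_pos (Finset.mem_range.mp hk))

theorem solutionB_eq_sum (k m : Int) (scores : List Int) (hm : 0 < m) :
    solution_alt k m scores =
      m * ∑ kk ∈ Finset.range (scores.length / m.toNat),
        (PySem.List.sorted scores (fun x => x) false).getD
          (scores.length % m.toNat + m.toNat * kk) 0 := by
  have hmcast : m = (m.toNat : Int) := (Int.toNat_of_nonneg hm.le).symm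
  have hmn : 0 < m.toNat := by omega
  set a := PySem.List.sorted scores (fun x => x) false with ha
  set mn := m.toNat with hmn'
  set n := scores.length with hn
  have hlen : a.length = n := PySem.List.length_sorted scores (fun x => x) false
  have hB : solution_alt k m scores = m * (((PySem.List.slice? a (some (PySem.Int.mod ((a.length : Nat) : Int) m)) none m).getD []).sum) := by
    rw [solution_alt, if_neg (not_le.mpr hm)]
  rw [hB, hlen]
  have hmod : PySem.Int.mod ((n : Nat) : Int) m = ((n % mn : Nat) : Int) := by
    rw [hmcast, PySem.Int.mod_natCast]
  rw [hmod]
  have hq := Nat.mod_add_div n mn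
  have hcount : (if ((n % mn : Nat) : Int) < ((n : Nat) : Int) then ((((n : Nat) : Int) - ((n % mn : Nat) : Int) + m - 1) / m).toNat else 0) = n / mn := by
    by_cases h0 : n % mn < n
    · rw [if_pos (by exact_mod_cast h0)]
      have hml := Nat.mod_le n mn
      have e : ((n : Nat) : Int) - ((n % mn : Nat) : Int) + m - 1 = ((n - n % mn + mn - 1 : Nat) : Int) := by
        rw [hmcast]; push_cast; omega
      rw [e, hmcast, ← Int.natCast_div, Int.toNat_natCast]
      have e2 : n - n % mn + mn - 1 = mn * (n / mn) + (mn - 1) := by omega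
      rw [e2, Nat.mul_add_div hmn, Nat.div_eq_of_lt (show mn - 1 < mn by omega), Nat.add_zero]
    · rw [if_neg (by exact_mod_cast h0)]
      have hml := Nat.mod_le n mn
      have hlt := Nat.mod_lt n hmn
      exact (Nat.div_eq_of_lt (by omega)).symm
  -- evaluate the strided slice
  have hslice : PySem.List.slice? a (some ((n % mn : Nat) : Int)) none m
      = some ((List.range (n / mn)).filterMap (fun (kk : Nat) => a[(((n % mn : Nat) : Int) + m * ((kk : Nat) : Int)).toNat]?)) := by
    rw [PySem.List.slice?, if_neg (by omega : ¬ m = 0), PySem.List.sliceIndices]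
    have hsn : ¬ m < 0 := by omega
    have hrn : ¬ ((n % mn : Nat) : Int) < 0 := not_lt.mpr (Int.natCast_nonneg _)
    simp only [if_neg hsn, hlen]
    rw [if_neg hrn]
    have hminr : min ((n % mn : Nat) : Int) ((n : Nat) : Int) = ((n % mn : Nat) : Int) := by
      have := Nat.mod_le n mn
      exact min_eq_left (by exact_mod_cast this)
    rw [hminr]
    simp only [if_pos hm]
    rw [hcount]
  rw [hslice, Option.getD_some]
  have hcongr : (List.range (n / mn)).filterMap (fun (kk : Nat) => a[(((n % mn : Nat) : Int) + m * ((kk : Nat) : Int)).toNat]?)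
      = (List.range (n / mn)).map (fun kk => a.getD (n % mn + mn * kk) 0) := by
    rw [List.filterMap_congr (g := fun kk => (some ∘ (fun kk => a.getD (n % mn + mn * kk) 0)) kk) ?_, List.filterMap_eq_map]
    intro kk hkk
    simp only [List.mem_range] at hkk
    have eidx : (((n % mn : Nat) : Int) + m * (kk : Int)).toNat = n % mn + mn * kk := by
      rw [hmcast]; push_cast; omega
    rw [eidx]
    have hklt : mn * kk < mn * (n / mn) := (Nat.mul_lt_mul_left hmn).mpr hkk
    have hidxlt : n % mn + mn * kk < a.length := by rw [hlen]; omega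
    simp only [Function.comp]
    rw [List.getElem?_eq_getElem hidxlt, List.getD_eq_getElem a 0 hidxlt]
  rw [hcongr, sum_map_range]

-- ===== VERDICT (by name: the statement is the Claim_ definition above) =====
theorem solution_spec : Claim_equal_solution := by
  intro k m scores _ hpre
  unfold Spec_solution
  rcases lt_trichotomy m 0 with hm | hm | hm
  · -- negative step: A's range is empty, B returns 0
    have h1 : PySem.List.pyRange 0 ((scores.length : Int)) m = [] := by
      have h0 : ¬ ((scores.length : Int) < 0) :=
        not_lt.mpr (Int.natCast_nonneg _)
      simp [PySem.List.pyRange, hm.ne, not_lt.mpr (le_of_lt hm), h0]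
    simp [solution, solution_alt, h1, le_of_lt hm]
  · exact absurd hm hpre
  · rw [solutionA_eq_sum k m scores hm, solutionB_eq_sum k m scores hm]
    rw [Finset.mul_sum]
    rw [← Finset.sum_range_reflect]
    apply Finset.sum_congr rfl
    intro kk hk
    simp only [Finset.mem_range] at hk
    have hmn : 0 < m.toNat := by omega
    have hidx : scores.length - m.toNat * (scores.length / m.toNat - 1 - kk + 1)
        = scores.length % m.toNat + m.toNat * kk := by
      have h1 := Nat.mod_add_div scores.length m.toNat
      have h2 : m.toNat * kk ≤ m.toNat * (scores.length / m.toNat) :=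
        Nat.mul_le_mul_left _ (by omega)
      have h3 : m.toNat * (scores.length / m.toNat - 1 - kk + 1)
          = m.toNat * (scores.length / m.toNat) - m.toNat * kk := by
        have e : scores.length / m.toNat - 1 - kk + 1 = scores.length / m.toNat - kk := by omega
        rw [e, Nat.mul_sub]
      omega
    rw [hidx, mul_comm]

@[simp] theorem solution_raises : Claim_raises_solution := by
  unfold Claim_raises_solution
  exact ⟨fun k m scores _ h => by simp [Raises_solution] at h; simp [Pre_solution, h], by decide⟩
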